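-- pv_equiv track=rewrite | github.com/RManLuo/ChatRule | data.py | construct_fact_dict
-- ===== SOURCE A (Python) =====
-- def construct_fact_dict(fact_rdf):
--     fact_dict = {}
--     for rdf in fact_rdf:
--         fact = parse_rdf(rdf)
--         h, r, t = fact
--         if r not in fact_dict:
--             fact_dict[r] = []
--         fact_dict[r].append(rdf)
--
--     return fact_dict
--
-- def parse_rdf(rdf):
--     """
--         return: head, relation, tail
--     """
--     return rdf
-- ===== SOURCE B (Python) =====
-- def construct_fact_dict(fact_rdf):
--     # two passes: first collect the distinct relations in first-occurrence order,
--     # then build one entry per relation by filtering the input.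
--     relations = dict.fromkeys(parse_rdf(rdf)[1] for rdf in fact_rdf)
--     return {r: [rdf for rdf in fact_rdf if parse_rdf(rdf)[1] == r] for r in relations}
--
-- def parse_rdf(rdf):
--     """
--         return: head, relation, tail
--     """
--     return rdf
-- ===== Notes on version B (the rewrite author's own statement) =====
-- stated objective: alternative
-- what changed: Replaces the single hash-and-append pass over a mutable dict by a two-pass decomposition: dedup the relations in first-occurrence order, then build each dict entry by filtering the input for that relation.
import Mathlib
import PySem

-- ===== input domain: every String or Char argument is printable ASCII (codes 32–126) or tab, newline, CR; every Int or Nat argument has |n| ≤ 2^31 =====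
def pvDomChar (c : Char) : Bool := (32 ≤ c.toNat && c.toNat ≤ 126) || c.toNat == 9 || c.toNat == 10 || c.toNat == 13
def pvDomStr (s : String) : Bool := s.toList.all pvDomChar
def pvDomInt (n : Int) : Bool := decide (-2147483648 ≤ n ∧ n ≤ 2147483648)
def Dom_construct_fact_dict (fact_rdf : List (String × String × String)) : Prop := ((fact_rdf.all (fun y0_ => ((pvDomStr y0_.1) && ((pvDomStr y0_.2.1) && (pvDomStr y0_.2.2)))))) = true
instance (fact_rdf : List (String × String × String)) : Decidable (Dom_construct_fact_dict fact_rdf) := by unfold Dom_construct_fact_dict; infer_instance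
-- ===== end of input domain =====

-- B replaces A's single hash-and-append pass by a two-pass decomposition (dedup the
-- relations in first-occurrence order, then filter the input per relation); same cost class, no speed claim.


-- ===== PORT A =====
def parse_rdf (rdf : String × String × String) : String × String × String := rdf

def construct_fact_dict (fact_rdf : List (String × String × String)) : List (String × List (String × String × String)) :=
  (fact_rdf.foldl (fun fact_dict rdf =>
      let fact := parse_rdf rdf
      let r := fact.2.1
      let fact_dict := if fact_dict.contains r then fact_dict else fact_dict.insert r []
      fact_dict.modify r [] (· ++ [rdf]))   -- fact_dict[r].append(rdf)
    PySem.Dict.empty).items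

-- ===== PORT B =====
def parse_rdf_alt (rdf : String × String × String) : String × String × String := rdf

-- the dict comprehension runs over `relations`, which has no duplicate keys, so its
-- items are exactly this map (exact: insertion order of a comprehension over distinct keys)
def construct_fact_dict_alt (fact_rdf : List (String × String × String)) : List (String × List (String × String × String)) :=
  let relations := PySem.List.dedup (fact_rdf.map (fun rdf => (parse_rdf_alt rdf).2.1))
  relations.map (fun r => (r, fact_rdf.filter (fun rdf => (parse_rdf_alt rdf).2.1 == r)))

-- ===== PRECONDITION & SPEC =====
def Spec_construct_fact_dict (fact_rdf : List (String × String × String)) (out : List (String × List (String × String × String))) : Prop := out = construct_fact_dict_alt fact_rdf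
instance (fact_rdf : List (String × String × String)) (out : List (String × List (String × String × String))) : Decidable (Spec_construct_fact_dict fact_rdf out) := by unfold Spec_construct_fact_dict; infer_instance

-- ===== CLAIM (what is proved, stated in full; the proofs are below) =====
def Claim_equal_construct_fact_dict : Prop := ∀ (fact_rdf : List (String × String × String)), Dom_construct_fact_dict fact_rdf → Spec_construct_fact_dict fact_rdf (construct_fact_dict fact_rdf)

-- ===== LEMMAS AND PROOFS =====

-- A's conditional "seed with [] then append" step is one Dict.modify
theorem stepA_eq_modify (d : PySem.Dict String (List (String × String × String)))
    (rdf : String × String × String) :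
    (if d.contains rdf.2.1 then d else d.insert rdf.2.1 []).modify rdf.2.1 [] (· ++ [rdf])
      = d.modify rdf.2.1 [] (· ++ [rdf]) := by
  by_cases h : d.contains rdf.2.1
  · simp [h]
  · have h' : d.contains rdf.2.1 = false := by simpa using h
    have h1 : (d.insert rdf.2.1 []).getD rdf.2.1 [] = [] := by simp [pysem]
    have h2 : d.getD rdf.2.1 [] = [] := PySem.Dict.getD_of_not_contains d [] h'
    simp [h', PySem.Dict.modify, h1, h2, PySem.Dict.insert_insert_self]

-- ===== VERDICT (by name: the statement is the Claim_ definition above) =====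
theorem construct_fact_dict_spec : Claim_equal_construct_fact_dict := by
  intro fact_rdf _
  unfold Spec_construct_fact_dict construct_fact_dict construct_fact_dict_alt parse_rdf parse_rdf_alt
  -- collapse A's loop body to a single modify
  have hbody : (fact_rdf.foldl (fun fact_dict rdf =>
      let fact := (rdf : String × String × String)
      let r := fact.2.1
      let fact_dict := if fact_dict.contains r then fact_dict else fact_dict.insert r []
      fact_dict.modify r [] (· ++ [rdf])) PySem.Dict.empty)
      = fact_rdf.foldl (fun d rdf => d.modify rdf.2.1 [] (· ++ [rdf])) PySem.Dict.empty := by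
    exact PySem.List.foldl_congr_mem _ _ _ _ (fun d x _ => stepA_eq_modify d x)
  rw [hbody]
  set D := fact_rdf.foldl (fun d rdf => d.modify rdf.2.1 [] (· ++ [rdf])) PySem.Dict.empty with hD
  have hkeys : D.keys = PySem.List.dedup (fact_rdf.map (fun rdf => rdf.2.1)) := by
    rw [hD, PySem.Dict.keys_foldl_modify_key]
    simp [pysem, PySem.Set.update_nil_left]
  have hnd : D.keys.Nodup := by
    rw [hkeys]; exact PySem.List.nodup_dedup _
  have hgetD : ∀ c, D.getD c [] = fact_rdf.filter (fun rdf => rdf.2.1 == c) := by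
    intro c
    have hmap : D = (fact_rdf.map (fun rdf => (rdf.2.1, rdf))).foldl
        (fun d p => d.modify p.1 [] (· ++ [p.2])) PySem.Dict.empty := by
      rw [hD, List.foldl_map]
    rw [hmap, PySem.Dict.getD_foldl_modify_append]
    simp [List.filter_map, Function.comp_def]
  rw [PySem.Dict.items_eq_map_keys D hnd [], hkeys]
  exact (List.map_congr_left (fun r _ => by rw [hgetD r])).symm
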